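-- pv_equiv track=rewrite | github.com/Rushali-Sarkar/python | PythonFiles/climbingLeaderBoard.py | climbingLeaderboard
-- ===== SOURCE A (Python) =====
-- def climbingLeaderboard(scores, alice):
--     scores = sorted(list(set(scores)))
--     index = 0
--     rank_list = []
--     n = len(scores)
--     for score in alice:
--         while(index < n and score >= scores[index]):
--             index = index + 1
--
--         rank_list.append(n - index + 1)
--
--     return rank_list
-- ===== SOURCE B (Python) =====
-- def _bisect_right(a, x):
--     # standard binary search: first position whose element is > x
--     lo, hi = 0, len(a)
--     while lo < hi:
--         mid = (lo + hi) // 2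
--         if x < a[mid]:
--             hi = mid
--         else:
--             lo = mid + 1
--     return lo
--
--
-- def climbingLeaderboard(scores, alice):
--     board = sorted(set(scores))
--     n = len(board)
--     best = 0
--     ranks = []
--     for score in alice:
--         pos = _bisect_right(board, score)
--         if pos > best:
--             best = pos
--         ranks.append(n - best + 1)
--     return ranks
-- ===== Notes on version B (the rewrite author's own statement) =====
-- stated objective: alternative
-- what changed: A sweeps a single shared pointer linearly over the sorted unique scores inside each query's while-loop; B instead answers each Alice score with an independent binary search (bisect_right) and keeps only a running maximum of the found positions, with no linear scanning.
import Mathlib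
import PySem

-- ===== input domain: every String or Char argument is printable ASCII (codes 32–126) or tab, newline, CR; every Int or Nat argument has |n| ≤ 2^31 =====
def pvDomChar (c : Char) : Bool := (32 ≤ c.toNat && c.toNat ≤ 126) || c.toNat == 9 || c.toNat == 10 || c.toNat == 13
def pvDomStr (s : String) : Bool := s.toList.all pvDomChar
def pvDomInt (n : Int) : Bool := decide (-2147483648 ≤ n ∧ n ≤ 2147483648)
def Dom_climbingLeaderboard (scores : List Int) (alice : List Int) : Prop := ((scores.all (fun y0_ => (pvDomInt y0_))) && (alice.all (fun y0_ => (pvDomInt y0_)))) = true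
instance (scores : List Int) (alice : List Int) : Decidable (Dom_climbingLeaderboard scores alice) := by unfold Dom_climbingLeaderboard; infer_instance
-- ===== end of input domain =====

-- B replaces A's linear shared-pointer sweep with an independent binary search per query
-- plus a running maximum (objective: alternative, same overall cost).

-- ===== PORT A =====
-- the 'while(index < n and score >= scores[index]): index += 1' loop
def pvAdvance (s : List Int) (score : Int) (i : Nat) : Nat :=
  if h : i < s.length then
    if s[i] ≤ score then pvAdvance s score (i + 1) else i
  else i
termination_by s.length - i

def climbingLeaderboard (scores : List Int) (alice : List Int) : List Int :=
  let s := PySem.List.sorted (PySem.Set.ofList scores) (fun x => x)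
  let n := s.length
  (alice.foldl
    (fun (st : Nat × List Int) score =>
      let index := pvAdvance s score st.1
      (index, st.2 ++ [(n : Int) - (index : Int) + 1]))
    (0, [])).2

-- ===== PORT B =====
-- Source B's hand-written _bisect_right is the standard CPython bisect_right loop,
-- ported as PySem.List.bisectRight (the identical lo/hi/mid loop).
def climbingLeaderboard_alt (scores : List Int) (alice : List Int) : List Int :=
  let board := PySem.List.sorted (PySem.Set.ofList scores) (fun x => x)
  let n := board.length
  (alice.foldl
    (fun (st : Nat × List Int) score =>
      let pos := PySem.List.bisectRight board score
      let best := if pos > st.1 then pos else st.1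
      (best, st.2 ++ [(n : Int) - (best : Int) + 1]))
    (0, [])).2

-- ===== PRECONDITION & SPEC =====
def Spec_climbingLeaderboard (scores : List Int) (alice : List Int) (out : List Int) : Prop := out = climbingLeaderboard_alt scores alice
instance (scores : List Int) (alice : List Int) (out : List Int) : Decidable (Spec_climbingLeaderboard scores alice out) := by unfold Spec_climbingLeaderboard; infer_instance

-- ===== CLAIM (what is proved, stated in full; the proofs are below) =====
def Claim_equal_climbingLeaderboard : Prop := ∀ (scores : List Int) (alice : List Int), Dom_climbingLeaderboard scores alice → Spec_climbingLeaderboard scores alice (climbingLeaderboard scores alice)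

-- ===== LEMMAS AND PROOFS =====

-- On a (≤)-sorted list, A's while-loop from position i lands exactly at
-- max i (bisect_right s score).
theorem pvAdvance_eq_max (s : List Int) (score : Int) (i : Nat)
    (hs : s.Pairwise (· ≤ ·)) :
    pvAdvance s score i = max i (PySem.List.bisectRight s score) := by
  obtain ⟨hle, hlt, hgt⟩ := PySem.List.bisectRight_spec s score hs
  set c := PySem.List.bisectRight s score with hc
  fun_induction pvAdvance s score i with
  | case1 i h hix ih =>
    have hic : i < c := by
      by_contra hge
      exact absurd (hgt i h (Nat.le_of_not_lt hge)) (not_lt.mpr hix)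
    omega
  | case2 i h hix =>
    have hci : c ≤ i := by
      by_contra hlt'
      exact hix (hlt i h (Nat.lt_of_not_le hlt'))
    omega
  | case3 i h =>
    omega

-- ===== VERDICT (by name: the statement is the Claim_ definition above) =====
theorem climbingLeaderboard_spec : Claim_equal_climbingLeaderboard := by
  intro scores alice _
  unfold Spec_climbingLeaderboard climbingLeaderboard climbingLeaderboard_alt
  have hs := PySem.List.sorted_pairwise (PySem.Set.ofList scores) (fun x : Int => x)
  set s := PySem.List.sorted (PySem.Set.ofList scores) (fun x : Int => x) with hsdef
  have hstep : (fun (st : Nat × List Int) score =>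
        let index := pvAdvance s score st.1
        (index, st.2 ++ [((s.length : Int)) - (index : Int) + 1]))
      = (fun (st : Nat × List Int) score =>
        let pos := PySem.List.bisectRight s score
        let best := if pos > st.1 then pos else st.1
        (best, st.2 ++ [((s.length : Int)) - (best : Int) + 1])) := by
    funext st score
    simp only
    have ha := pvAdvance_eq_max s score st.1 hs
    have hb : (if PySem.List.bisectRight s score > st.1 then PySem.List.bisectRight s score
        else st.1) = max st.1 (PySem.List.bisectRight s score) := by split <;> omega
    rw [ha, hb]
  simp only [hstep]
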